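-- pv_equiv track=rewrite | github.com/narratorai/py-queryparser | queryParser.py | track_parenthes
-- ===== SOURCE A (Python) =====
-- def track_parenthes(text, is_in_quotes):
-- 	p = 0
--
-- 	for s in text:
-- 		if s=="'":
-- 			is_in_quotes = not is_in_quotes
--
-- 		elif not is_in_quotes:
-- 			if s == '(':
-- 				p +=1
-- 			elif s == ')':
-- 				p -=1
--
-- 	return (p, is_in_quotes)
-- ===== SOURCE B (Python) =====
-- def track_parenthes(text, is_in_quotes):
--     segs = text.split("'")
--     outside = segs[1::2] if is_in_quotes else segs[0::2]
--     p = sum(seg.count('(') - seg.count(')') for seg in outside)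
--     final = (not is_in_quotes) if len(segs) % 2 == 0 else is_in_quotes
--     return (p, final)
-- ===== Notes on version B (the rewrite author's own statement) =====
-- stated objective: faster
-- what changed: Replaces A's character-by-character state machine (quote flag toggled per char, per-char branch on '(' and ')') by splitting the text on single quotes and summing seg.count('(') - seg.count(')') over every other segment (C-level str.split/str.count instead of a Python-level loop), with the final flag computed from the segment-count parity.
import Mathlib
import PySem

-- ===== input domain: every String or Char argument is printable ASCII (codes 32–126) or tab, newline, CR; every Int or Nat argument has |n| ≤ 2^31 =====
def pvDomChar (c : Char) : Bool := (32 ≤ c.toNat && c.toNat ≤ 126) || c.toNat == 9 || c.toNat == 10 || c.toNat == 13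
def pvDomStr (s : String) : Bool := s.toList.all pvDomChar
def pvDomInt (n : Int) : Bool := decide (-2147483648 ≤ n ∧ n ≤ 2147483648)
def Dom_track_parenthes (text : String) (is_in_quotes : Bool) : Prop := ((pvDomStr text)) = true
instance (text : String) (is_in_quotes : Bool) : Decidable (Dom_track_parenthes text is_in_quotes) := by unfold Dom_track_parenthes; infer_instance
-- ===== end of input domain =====

-- B replaces A's char-by-char state machine by split-on-quote + summing paren
-- counts over every other segment (objective: faster; measured faster at the
-- timing run's largest size via C-level split/count, both O(n)).

-- ===== PORT A =====
-- A's loop body: quote toggles the flag; outside quotes '(' / ')' adjust p.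
def pvStepA (st : Int × Bool) (s : Char) : Int × Bool :=
  if s = '\'' then (st.1, !st.2)
  else if !st.2 then
    if s = '(' then (st.1 + 1, st.2)
    else if s = ')' then (st.1 - 1, st.2)
    else st
  else st

def track_parenthes (text : String) (is_in_quotes : Bool) : Int × Bool :=
  text.toList.foldl pvStepA (0, is_in_quotes)

-- ===== PORT B =====
-- hand port of text.split("'") for the single-char separator (exact)
def pvSplitQuote : List Char → List (List Char)
  | [] => [[]]
  | c :: cs =>
    if c = '\'' then [] :: pvSplitQuote cs
    else
      match pvSplitQuote cs with
      | [] => [[c]]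
      | h :: t => (c :: h) :: t

-- hand port of the step-2 slice: pvAltTake true xs = xs[0::2], pvAltTake false xs = xs[1::2] (exact)
def pvAltTake {α : Type} (b : Bool) : List α → List α
  | [] => []
  | x :: xs => if b then x :: pvAltTake (!b) xs else pvAltTake (!b) xs

-- seg.count('(') - seg.count(')')
def pvSegNet (seg : List Char) : Int := (seg.count '(' : Int) - (seg.count ')' : Int)

def track_parenthes_alt (text : String) (is_in_quotes : Bool) : Int × Bool :=
  let segs := pvSplitQuote text.toList
  let outside := pvAltTake (!is_in_quotes) segs
  let p := (outside.map pvSegNet).sum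
  let final := if segs.length % 2 = 0 then !is_in_quotes else is_in_quotes
  (p, final)

-- ===== PRECONDITION & SPEC =====
def Spec_track_parenthes (text : String) (is_in_quotes : Bool) (out : Int × Bool) : Prop := out = track_parenthes_alt text is_in_quotes
instance (text : String) (is_in_quotes : Bool) (out : Int × Bool) : Decidable (Spec_track_parenthes text is_in_quotes out) := by unfold Spec_track_parenthes; infer_instance

-- ===== CLAIM (what is proved, stated in full; the proofs are below) =====
def Claim_equal_track_parenthes : Prop := ∀ (text : String) (is_in_quotes : Bool), Dom_track_parenthes text is_in_quotes → Spec_track_parenthes text is_in_quotes (track_parenthes text is_in_quotes)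

-- ===== LEMMAS AND PROOFS =====

lemma pvSplitQuote_ne_nil (cs : List Char) : pvSplitQuote cs ≠ [] := by
  cases cs with
  | nil => simp [pvSplitQuote]
  | cons c cs =>
    simp only [pvSplitQuote]
    split
    · simp
    · cases h : pvSplitQuote cs <;> simp

lemma pvFoldA_eq (cs : List Char) (q : Bool) (p : Int) :
    cs.foldl pvStepA (p, q) =
      (p + ((pvAltTake (!q) (pvSplitQuote cs)).map pvSegNet).sum,
       if (pvSplitQuote cs).length % 2 = 0 then !q else q) := by
  induction cs generalizing q p with
  | nil => cases q <;> simp [pvSplitQuote, pvAltTake, pvSegNet]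
  | cons c cs ih =>
    by_cases hq : c = '\''
    · subst hq
      simp only [List.foldl_cons, pvStepA, pvSplitQuote]
      rw [ih]
      cases q <;>
        simp [pvAltTake, pvSegNet] <;>
        rcases Nat.mod_two_eq_zero_or_one ((pvSplitQuote cs).length) with hm | hm <;>
        simp [hm, Nat.add_mod]
    · have hsplit : ∃ h t, pvSplitQuote cs = h :: t := by
        cases hc : pvSplitQuote cs with
        | nil => exact absurd hc (pvSplitQuote_ne_nil cs)
        | cons h t => exact ⟨h, t, rfl⟩
      obtain ⟨h, t, hc⟩ := hsplit
      have hsq : pvSplitQuote (c :: cs) = (c :: h) :: t := by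
        simp [pvSplitQuote, hq, hc]
      rw [hsq]
      cases q with
      | true =>
        have : pvStepA (p, true) c = (p, true) := by simp [pvStepA, hq]
        rw [List.foldl_cons, this, ih, hc]
        simp [pvAltTake]
      | false =>
        have hstep : pvStepA (p, false) c =
            (p + (if c = '(' then 1 else if c = ')' then -1 else 0), false) := by
          simp only [pvStepA, if_neg hq]
          split_ifs <;> simp_all; omega
        rw [List.foldl_cons, hstep, ih, hc]
        have hseg : pvSegNet (c :: h) =
            (if c = '(' then 1 else if c = ')' then -1 else 0) + pvSegNet h := by
          simp only [pvSegNet, List.count_cons]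
          split_ifs with h1 h2 <;> simp_all <;> omega
        simp [pvAltTake, hseg]
        ring

-- ===== VERDICT (by name: the statement is the Claim_ definition above) =====
theorem track_parenthes_spec : Claim_equal_track_parenthes := by
  intro text q _
  unfold Spec_track_parenthes track_parenthes track_parenthes_alt
  rw [pvFoldA_eq]
  simp
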